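-- pv_equiv track=rewrite | github.com/bhmortim/quidnug | examples/institutional-custody/custody_policy.py | wallet_frozen_by_events
-- ===== SOURCE A (Python) =====
-- from typing import Dict, List, Optional
--
-- def wallet_frozen_by_events(events: List[dict]) -> bool:
--     """Return True if the wallet has had a `wallet.frozen` event,
--     unless a later `wallet.unfrozen` event exists."""
--     frozen = False
--     for ev in events:
--         et = ev.get("eventType") or ev.get("event_type") or ""
--         if et == "wallet.frozen":
--             frozen = True
--         elif et == "wallet.unfrozen":
--             frozen = False
--     return frozen
-- ===== SOURCE B (Python) =====
-- def wallet_frozen_by_events(events):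
--     """Return True if the wallet has had a `wallet.frozen` event,
--     unless a later `wallet.unfrozen` event exists."""
--     for ev in reversed(events):
--         et = ev.get("eventType") or ev.get("event_type") or ""
--         if et == "wallet.frozen":
--             return True
--         if et == "wallet.unfrozen":
--             return False
--     return False
-- ===== Notes on version B (the rewrite author's own statement) =====
-- stated objective: alternative
-- what changed: B scans the events backward and returns at the first wallet.frozen/wallet.unfrozen event (early exit), instead of A's forward pass accumulating a flag over every event.
import Mathlib
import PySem

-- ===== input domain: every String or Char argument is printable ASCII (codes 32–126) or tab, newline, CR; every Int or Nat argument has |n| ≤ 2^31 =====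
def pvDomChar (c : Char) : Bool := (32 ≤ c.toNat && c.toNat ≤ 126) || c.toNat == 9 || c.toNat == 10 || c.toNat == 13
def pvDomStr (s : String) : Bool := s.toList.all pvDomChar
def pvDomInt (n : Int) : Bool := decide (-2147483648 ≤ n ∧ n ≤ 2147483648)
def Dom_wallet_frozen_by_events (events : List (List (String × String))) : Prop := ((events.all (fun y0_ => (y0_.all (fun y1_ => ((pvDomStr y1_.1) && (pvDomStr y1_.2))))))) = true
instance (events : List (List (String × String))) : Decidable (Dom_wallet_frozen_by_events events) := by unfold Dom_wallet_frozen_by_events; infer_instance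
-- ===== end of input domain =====

-- B replaces A's forward flag-accumulating pass by a backward scan that returns at the
-- first relevant event (alternative decomposition; same worst-case cost, early exit).

-- ===== PORT A =====
-- ev.get(k) or-chained with "": first-match lookup, "" when missing or falsy
def wfbGetD (ev : List (String × String)) (k : String) : String :=
  match ev.find? (fun p => p.1 == k) with
  | some p => p.2
  | none => ""

-- et = ev.get("eventType") or ev.get("event_type") or ""
def wfbEt (ev : List (String × String)) : String :=
  let a := wfbGetD ev "eventType"
  if a ≠ "" then a else wfbGetD ev "event_type"

def wallet_frozen_by_events (events : List (List (String × String))) : Bool :=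
  events.foldl
    (fun frozen ev =>
      let et := wfbEt ev
      if et = "wallet.frozen" then true
      else if et = "wallet.unfrozen" then false
      else frozen)
    false

-- ===== PORT B =====
-- backward scan with early return
def wfbGo : List (List (String × String)) → Bool
  | [] => false
  | ev :: rest =>
    let et := wfbEt ev
    if et = "wallet.frozen" then true
    else if et = "wallet.unfrozen" then false
    else wfbGo rest

def wallet_frozen_by_events_alt (events : List (List (String × String))) : Bool :=
  wfbGo events.reverse

-- ===== PRECONDITION & SPEC =====
def Spec_wallet_frozen_by_events (events : List (List (String × String))) (out : Bool) : Prop := out = wallet_frozen_by_events_alt events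
instance (events : List (List (String × String))) (out : Bool) : Decidable (Spec_wallet_frozen_by_events events out) := by unfold Spec_wallet_frozen_by_events; infer_instance

-- ===== CLAIM (what is proved, stated in full; the proofs are below) =====
def Claim_equal_wallet_frozen_by_events : Prop := ∀ (events : List (List (String × String))), Dom_wallet_frozen_by_events events → Spec_wallet_frozen_by_events events (wallet_frozen_by_events events)

-- ===== LEMMAS AND PROOFS =====
theorem wfb_eq (events : List (List (String × String))) :
    wallet_frozen_by_events events = wfbGo events.reverse := by
  induction events using List.reverseRecOn with
  | nil => rfl
  | append_singleton xs x ih =>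
    simp only [wallet_frozen_by_events, List.foldl_append, List.foldl_cons, List.foldl_nil,
      List.reverse_append, List.reverse_cons, List.reverse_nil, List.nil_append,
      List.singleton_append, wfbGo]
    by_cases h1 : wfbEt x = "wallet.frozen"
    · simp [h1]
    · by_cases h2 : wfbEt x = "wallet.unfrozen"
      · simp [h2]
      · simpa [wallet_frozen_by_events, h1, h2] using ih

-- ===== VERDICT (by name: the statement is the Claim_ definition above) =====
theorem wallet_frozen_by_events_spec : Claim_equal_wallet_frozen_by_events := by
  intro events _
  unfold Spec_wallet_frozen_by_events wallet_frozen_by_events_alt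
  exact wfb_eq events
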